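-- pv_equiv track=rewrite | github.com/RafalW3bCraft/G3r4kiSecBot | routes.py | get_threat_categories
-- ===== SOURCE A (Python) =====
-- def get_threat_categories(threat_sources):
--     """Categorize threats based on sources"""
--     categories = []
--     for source in threat_sources:
--         if 'malware' in source.lower():
--             categories.append('Malware')
--         elif 'phishing' in source.lower():
--             categories.append('Phishing')
--         elif 'spam' in source.lower():
--             categories.append('Spam')
--         elif 'suspicious' in source.lower():
--             categories.append('Suspicious')
--     return list(set(categories)) or ['General']
-- ===== SOURCE B (Python) =====
-- def get_threat_categories(threat_sources):
--     """Categorize threats, category-major: for each category in priority order,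
--     ask whether some source matches its keyword and no higher-priority keyword."""
--     table = [('malware', 'Malware'), ('phishing', 'Phishing'),
--              ('spam', 'Spam'), ('suspicious', 'Suspicious')]
--     result = []
--     for i, (kw, cat) in enumerate(table):
--         earlier = [k for k, _ in table[:i]]
--         if any(kw in s.lower() and not any(e in s.lower() for e in earlier)
--                for s in threat_sources):
--             result.append(cat)
--     return result or ['General']
-- ===== Notes on version B (the rewrite author's own statement) =====
-- stated objective: alternative
-- what changed: Inverts the loop nesting: instead of A's source-major scan appending per-source categories and deduplicating at the end, B iterates category-major over an ordered (keyword, category) table and includes a category iff some source matches its keyword and no higher-priority keyword, emitting each category at most once in fixed table order.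
import Mathlib
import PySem

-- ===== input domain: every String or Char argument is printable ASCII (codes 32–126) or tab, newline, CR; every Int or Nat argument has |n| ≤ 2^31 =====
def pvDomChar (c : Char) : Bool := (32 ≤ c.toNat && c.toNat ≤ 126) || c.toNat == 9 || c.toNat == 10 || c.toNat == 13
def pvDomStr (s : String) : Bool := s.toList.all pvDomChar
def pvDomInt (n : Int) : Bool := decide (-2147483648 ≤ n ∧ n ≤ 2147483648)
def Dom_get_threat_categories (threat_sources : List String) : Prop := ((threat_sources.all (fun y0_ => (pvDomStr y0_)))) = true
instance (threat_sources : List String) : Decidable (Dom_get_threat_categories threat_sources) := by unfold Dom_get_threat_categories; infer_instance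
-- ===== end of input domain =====

-- B inverts the loop nesting: category-major over an ordered (keyword, category) table, including a
-- category iff some source matches its keyword and no higher-priority keyword (alternative, same cost).

-- ===== PORT A =====
def get_threat_categories (threat_sources : List String) : List String :=
  let categories := threat_sources.foldl (fun acc source =>
    if PySem.Str.isIn "malware" (PySem.Str.lower source) then acc ++ ["Malware"]
    else if PySem.Str.isIn "phishing" (PySem.Str.lower source) then acc ++ ["Phishing"]
    else if PySem.Str.isIn "spam" (PySem.Str.lower source) then acc ++ ["Spam"]
    else if PySem.Str.isIn "suspicious" (PySem.Str.lower source) then acc ++ ["Suspicious"]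
    else acc) []
  let r := PySem.Set.ofList categories
  if r = [] then ["General"] else r

-- ===== PORT B =====
def pvTable : List (String × String) :=
  [("malware", "Malware"), ("phishing", "Phishing"), ("spam", "Spam"), ("suspicious", "Suspicious")]

def get_threat_categories_alt (threat_sources : List String) : List String :=
  let result := (PySem.List.enumerate pvTable).foldl (fun result p =>
    let i := p.1
    let kw := p.2.1
    let cat := p.2.2
    let earlier := (PySem.List.slice pvTable none (some i)).map Prod.fst
    if threat_sources.any (fun s =>
        PySem.Str.isIn kw (PySem.Str.lower s) &&
        !(earlier.any (fun e => PySem.Str.isIn e (PySem.Str.lower s))))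
    then result ++ [cat] else result) []
  if result = [] then ["General"] else result

-- ===== PRECONDITION & SPEC =====
-- Classifier used ONLY by Pre_ (it may not reach either port).
def pvPreCat (source : String) : Option String :=
  if PySem.Str.isIn "malware" (PySem.Str.lower source) then some "Malware"
  else if PySem.Str.isIn "phishing" (PySem.Str.lower source) then some "Phishing"
  else if PySem.Str.isIn "spam" (PySem.Str.lower source) then some "Spam"
  else if PySem.Str.isIn "suspicious" (PySem.Str.lower source) then some "Suspicious"
  else none

-- Pre_ excludes inputs whose sources trigger two or more distinct categories, because there
-- A's list(set(...)) iteration order is hash-seed dependent (accidental, varies between runs).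
def Pre_get_threat_categories (threat_sources : List String) : Prop :=
  (PySem.List.dedup (threat_sources.filterMap pvPreCat)).length ≤ 1
instance (threat_sources : List String) : Decidable (Pre_get_threat_categories threat_sources) := by
  unfold Pre_get_threat_categories; infer_instance

def pvWitness_get_threat_categories : List String := ["malware here", "x"]

def Spec_get_threat_categories (threat_sources : List String) (out : List String) : Prop := out = get_threat_categories_alt threat_sources
instance (threat_sources : List String) (out : List String) : Decidable (Spec_get_threat_categories threat_sources out) := by unfold Spec_get_threat_categories; infer_instance

-- ===== CLAIM (what is proved, stated in full; the proofs are below) =====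
def Claim_equal_get_threat_categories : Prop := ∀ (threat_sources : List String), Dom_get_threat_categories threat_sources → Pre_get_threat_categories threat_sources → Spec_get_threat_categories threat_sources (get_threat_categories threat_sources)

-- ===== LEMMAS AND PROOFS =====

-- One iteration of A's loop appends the classifier's output.
lemma pvA_body (acc : List String) (source : String) :
    (if PySem.Str.isIn "malware" (PySem.Str.lower source) then acc ++ ["Malware"]
     else if PySem.Str.isIn "phishing" (PySem.Str.lower source) then acc ++ ["Phishing"]
     else if PySem.Str.isIn "spam" (PySem.Str.lower source) then acc ++ ["Spam"]
     else if PySem.Str.isIn "suspicious" (PySem.Str.lower source) then acc ++ ["Suspicious"]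
     else acc) = acc ++ (pvPreCat source).toList := by
  simp only [pvPreCat]
  split_ifs <;> simp

-- A's loop builds exactly the filterMap of the per-source classifier.
lemma pvA_loop (threat_sources : List String) (acc : List String) :
    threat_sources.foldl (fun acc source =>
      if PySem.Str.isIn "malware" (PySem.Str.lower source) then acc ++ ["Malware"]
      else if PySem.Str.isIn "phishing" (PySem.Str.lower source) then acc ++ ["Phishing"]
      else if PySem.Str.isIn "spam" (PySem.Str.lower source) then acc ++ ["Spam"]
      else if PySem.Str.isIn "suspicious" (PySem.Str.lower source) then acc ++ ["Suspicious"]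
      else acc) acc = acc ++ threat_sources.filterMap pvPreCat := by
  induction threat_sources generalizing acc with
  | nil => simp
  | cons s rest ih =>
    rw [List.foldl_cons, pvA_body, ih, List.filterMap_cons]
    cases pvPreCat s <;> simp

-- B's per-source predicate at each of the four table rows agrees with the classifier.
lemma pvB_pred0 (s : String) :
    (PySem.Str.isIn "malware" (PySem.Str.lower s) &&
      !(([] : List String).any (fun e => PySem.Str.isIn e (PySem.Str.lower s))))
    = decide (pvPreCat s = some "Malware") := by
  simp only [pvPreCat]; split_ifs <;> simp_all

lemma pvB_pred1 (s : String) :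
    (PySem.Str.isIn "phishing" (PySem.Str.lower s) &&
      !((["malware"] : List String).any (fun e => PySem.Str.isIn e (PySem.Str.lower s))))
    = decide (pvPreCat s = some "Phishing") := by
  simp only [pvPreCat]; split_ifs <;> simp_all

lemma pvB_pred2 (s : String) :
    (PySem.Str.isIn "spam" (PySem.Str.lower s) &&
      !((["malware", "phishing"] : List String).any (fun e => PySem.Str.isIn e (PySem.Str.lower s))))
    = decide (pvPreCat s = some "Spam") := by
  simp only [pvPreCat]; split_ifs <;> simp_all

lemma pvB_pred3 (s : String) :
    (PySem.Str.isIn "suspicious" (PySem.Str.lower s) &&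
      !((["malware", "phishing", "spam"] : List String).any (fun e => PySem.Str.isIn e (PySem.Str.lower s))))
    = decide (pvPreCat s = some "Suspicious") := by
  simp only [pvPreCat]; split_ifs <;> simp_all

-- The enumerated table and its prefix slices, evaluated.
lemma pvEnum : PySem.List.enumerate pvTable =
    [((0 : Int), ("malware", "Malware")), (1, ("phishing", "Phishing")),
     (2, ("spam", "Spam")), (3, ("suspicious", "Suspicious"))] := rfl

-- Proof-only abbreviations: 'some source classifies to c' and B's pre-fallback result.
def pvHit (ts : List String) (c : String) : Bool := ts.any (fun s => decide (pvPreCat s = some c))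

def pvRes (ts : List String) : List String :=
  (if pvHit ts "Malware" then ["Malware"] else []) ++
  (if pvHit ts "Phishing" then ["Phishing"] else []) ++
  (if pvHit ts "Spam" then ["Spam"] else []) ++
  (if pvHit ts "Suspicious" then ["Suspicious"] else [])

-- The table's prefix slices, evaluated.
lemma pvSlice0 : List.map Prod.fst (PySem.List.slice pvTable none (some (0 : Int))) = ([] : List String) := rfl
lemma pvSlice1 : List.map Prod.fst (PySem.List.slice pvTable none (some (1 : Int))) = ["malware"] := rfl
lemma pvSlice2 : List.map Prod.fst (PySem.List.slice pvTable none (some (2 : Int))) = ["malware", "phishing"] := rfl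
lemma pvSlice3 : List.map Prod.fst (PySem.List.slice pvTable none (some (3 : Int))) = ["malware", "phishing", "spam"] := rfl

-- The per-row predicates, as equalities of whole functions (for rewriting inside .any).
lemma pvLam0 : (fun s => PySem.Str.isIn "malware" (PySem.Str.lower s) &&
      !(([] : List String).any (fun e => PySem.Str.isIn e (PySem.Str.lower s))))
    = (fun s => decide (pvPreCat s = some "Malware")) := funext fun s => pvB_pred0 s

lemma pvLam1 : (fun s => PySem.Str.isIn "phishing" (PySem.Str.lower s) &&
      !((["malware"] : List String).any (fun e => PySem.Str.isIn e (PySem.Str.lower s))))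
    = (fun s => decide (pvPreCat s = some "Phishing")) := funext fun s => pvB_pred1 s

lemma pvLam2 : (fun s => PySem.Str.isIn "spam" (PySem.Str.lower s) &&
      !((["malware", "phishing"] : List String).any (fun e => PySem.Str.isIn e (PySem.Str.lower s))))
    = (fun s => decide (pvPreCat s = some "Spam")) := funext fun s => pvB_pred2 s

lemma pvLam3 : (fun s => PySem.Str.isIn "suspicious" (PySem.Str.lower s) &&
      !((["malware", "phishing", "spam"] : List String).any (fun e => PySem.Str.isIn e (PySem.Str.lower s))))
    = (fun s => decide (pvPreCat s = some "Suspicious")) := funext fun s => pvB_pred3 s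

-- B's whole fold, written through the classifier: one conditional append per category.
set_option maxHeartbeats 2000000 in
lemma pvB_eval (ts : List String) :
    get_threat_categories_alt ts = if pvRes ts = [] then ["General"] else pvRes ts := by
  unfold get_threat_categories_alt
  rw [pvEnum]
  simp only [List.foldl_cons, List.foldl_nil]
  rw [pvSlice0, pvSlice1, pvSlice2, pvSlice3]
  rw [pvLam0, pvLam1, pvLam2, pvLam3]
  unfold pvRes pvHit
  by_cases h0 : (ts.any fun s => decide (pvPreCat s = some "Malware")) = true <;>
  by_cases h1 : (ts.any fun s => decide (pvPreCat s = some "Phishing")) = true <;>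
  by_cases h2 : (ts.any fun s => decide (pvPreCat s = some "Spam")) = true <;>
  by_cases h3 : (ts.any fun s => decide (pvPreCat s = some "Suspicious")) = true <;>
  simp [h0, h1, h2, h3]

-- hit c is membership in the classified list.
lemma pvHit_iff (threat_sources : List String) (c : String) :
    (pvHit threat_sources c = true) ↔ c ∈ threat_sources.filterMap pvPreCat := by
  unfold pvHit
  rw [List.any_eq_true, List.mem_filterMap]
  constructor
  · rintro ⟨s, hs, h⟩; exact ⟨s, hs, of_decide_eq_true h⟩
  · rintro ⟨s, hs, h⟩; exact ⟨s, hs, decide_eq_true h⟩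

-- Every classified value is one of the four category names.
lemma pvPreCat_mem (s c : String) (h : pvPreCat s = some c) :
    c = "Malware" ∨ c = "Phishing" ∨ c = "Spam" ∨ c = "Suspicious" := by
  simp only [pvPreCat] at h
  split_ifs at h <;> simp_all

-- ===== VERDICT (by name: the statement is the Claim_ definition above) =====
theorem get_threat_categories_spec : Claim_equal_get_threat_categories := by
  intro threat_sources _dom hpre
  unfold Spec_get_threat_categories
  rw [pvB_eval]
  unfold get_threat_categories
  rw [pvA_loop, List.nil_append]
  unfold Pre_get_threat_categories at hpre
  set L := threat_sources.filterMap pvPreCat with hL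
  rcases hD : PySem.List.dedup L with _ | ⟨c, rest⟩
  · -- no source classified: L = []
    have hLnil : L = [] := by
      cases hLe : L with
      | nil => rfl
      | cons x xs =>
        exfalso
        have hx : x ∈ PySem.List.dedup L := by
          rw [PySem.List.mem_dedup, hLe]; exact List.mem_cons_self
        rw [hD] at hx
        exact absurd hx (List.not_mem_nil)
    have hhit : ∀ c, pvHit threat_sources c = false := by
      intro c
      cases h : pvHit threat_sources c with
      | false => rfl
      | true =>
        have hm := (pvHit_iff threat_sources c).mp h
        rw [← hL, hLnil] at hm
        exact absurd hm (List.not_mem_nil)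
    simp [pvRes, hLnil, hhit]
  · -- exactly one distinct category c
    have hrest : rest = [] := by
      rw [hD] at hpre; simp at hpre; omega
    subst hrest
    have hcL : c ∈ L := by
      rw [← PySem.List.mem_dedup, hD]; exact List.mem_singleton_self _
    have hall : ∀ x ∈ L, x = c := by
      intro x hx
      have hx2 : x ∈ PySem.List.dedup L := by rw [PySem.List.mem_dedup]; exact hx
      rw [hD] at hx2
      simpa using hx2
    have hofList : PySem.Set.ofList L = [c] := by
      rw [← PySem.List.dedup_eq_ofList, hD]
    have hyes : pvHit threat_sources c = true := by
      rw [pvHit_iff, ← hL]; exact hcL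
    have hno : ∀ d, d ≠ c → pvHit threat_sources d = false := by
      intro d hd
      cases h : pvHit threat_sources d with
      | false => rfl
      | true =>
        have hm := (pvHit_iff threat_sources d).mp h
        rw [← hL] at hm
        exact absurd (hall d hm) hd
    obtain ⟨s, _hs, hsc⟩ := List.mem_filterMap.mp hcL
    rcases pvPreCat_mem s c hsc with rfl | rfl | rfl | rfl
    · simp [pvRes, hofList, hyes, hno "Phishing" (by decide),
        hno "Spam" (by decide), hno "Suspicious" (by decide)]
    · simp [pvRes, hofList, hyes, hno "Malware" (by decide),
        hno "Spam" (by decide), hno "Suspicious" (by decide)]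
    · simp [pvRes, hofList, hyes, hno "Malware" (by decide),
        hno "Phishing" (by decide), hno "Suspicious" (by decide)]
    · simp [pvRes, hofList, hyes, hno "Malware" (by decide),
        hno "Phishing" (by decide), hno "Spam" (by decide)]
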